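-- pv_equiv track=rewrite | github.com/Atmanbay/aoc | 2024/src/days/12.py | get_total_cost
-- ===== SOURCE A (Python) =====
-- def get_region_cost(grid, coord, plant_type, visited):
--     row_count = len(grid)
--     col_count = len(grid[0])
--     stack = [coord]
--     region = []
--     perimeter = 0
--
--     while stack:
--         row, col = stack.pop()
--
--         if (row, col) in visited:
--             continue
--         visited.add((row, col))
--         region.append((row, col))
--
--         for row_diff, col_diff in [(-1, 0), (1, 0), (0, -1), (0, 1)]:
--             new_row = row + row_diff
--             new_col = col + col_diff
--             if 0 <= new_row < row_count and 0 <= new_col < col_count: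
--                 if grid[new_row][new_col] == plant_type:
--                     stack.append((new_row, new_col))
--                 else:
--                     perimeter += 1
--             else:
--                 perimeter += 1
--
--     return len(region) * perimeter
--
-- def get_total_cost(grid):
--     visited = set()
--     total_cost = 0
--
--     for row in range(len(grid)):
--         for col in range(len(grid[0])):
--             if (row, col) not in visited:
--                 plant_type = grid[row][col]
--                 total_cost += get_region_cost(grid, (row, col), plant_type, visited)
--
--     return total_cost
-- ===== SOURCE B (Python) =====
-- def get_total_cost(grid):
--     n = len(grid)
--     m = len(grid[0]) if grid else 0
--
--     # union-find over cell indices r*m+c, union-by-min so every root is its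
--     # component's smallest (row-major first) cell index
--     parent = list(range(n * m))
--
--     def find(i):
--         while parent[i] != i:
--             i = parent[i]
--         return i
--
--     def union(a, b):
--         ra = find(a)
--         rb = find(b)
--         if ra != rb:
--             if ra < rb:
--                 parent[rb] = ra
--             else:
--                 parent[ra] = rb
--
--     for r in range(n):
--         for c in range(m):
--             if c + 1 < m and grid[r][c + 1] == grid[r][c]:
--                 union(r * m + c, r * m + c + 1)
--             if r + 1 < n and grid[r + 1][c] == grid[r][c]:
--                 union(r * m + c, (r + 1) * m + c)
--
--     area = {}
--     perim = {}
--     for r in range(n):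
--         for c in range(m):
--             root = find(r * m + c)
--             b = 0
--             for dr, dc in ((-1, 0), (1, 0), (0, -1), (0, 1)):
--                 nr, nc = r + dr, c + dc
--                 if not (0 <= nr < n and 0 <= nc < m) or grid[nr][nc] != grid[r][c]:
--                     b += 1
--             area[root] = area.get(root, 0) + 1
--             perim[root] = perim.get(root, 0) + b
--     return sum(area[k] * perim[k] for k in area)
-- ===== Notes on version B (the rewrite author's own statement) =====
-- stated objective: alternative
-- what changed: Replaces A's per-region DFS flood fill (explicit stack, shared visited set, perimeter counted during traversal) with a union-find over cell indices: one pass unions each cell with its same-plant right/down neighbours (union-by-min), a second pass accumulates per-root area and perimeter in dicts, and the result is the sum of area*perimeter over roots.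
import Mathlib
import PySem

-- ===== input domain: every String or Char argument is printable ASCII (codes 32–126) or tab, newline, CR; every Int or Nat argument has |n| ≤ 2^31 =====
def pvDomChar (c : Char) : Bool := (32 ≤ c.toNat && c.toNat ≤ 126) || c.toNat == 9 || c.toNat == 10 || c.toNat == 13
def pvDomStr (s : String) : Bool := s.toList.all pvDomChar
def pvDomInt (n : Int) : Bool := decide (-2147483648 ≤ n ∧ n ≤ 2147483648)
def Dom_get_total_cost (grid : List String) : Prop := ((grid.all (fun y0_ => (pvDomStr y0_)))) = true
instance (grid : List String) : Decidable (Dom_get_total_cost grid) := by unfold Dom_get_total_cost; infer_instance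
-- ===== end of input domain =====

-- B re-implements A's per-region DFS flood fill as a union-find over cell indices
-- (union right/down same-plant neighbours, then aggregate area/perimeter per root);
-- objective: alternative algorithm, same exact totals.

-- ===== PORT A =====

-- grid[r][c] (Int indices); ' ' default is only reached outside Pre_ (Python raises there)
def pvCharA (grid : List String) (r c : Int) : Char :=
  ((PySem.List.pyGet? grid r).bind (fun s => PySem.Str.pyGet? s c)).getD ' '

def pvDirs : List (Int × Int) := [(-1,0),(1,0),(0,-1),(0,1)]

-- body of A's 'for row_diff, col_diff in [...]' loop: pushes same-plant in-bounds
-- neighbours (consed on top = Python append-at-end with pop-at-end), else perimeter += 1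
def pvStep (grid : List String) (n m : Int) (plant : Char) (cell : Int × Int)
    (acc : List (Int × Int) × Int) (d : Int × Int) : List (Int × Int) × Int :=
  let nr := cell.1 + d.1
  let nc := cell.2 + d.2
  if 0 ≤ nr ∧ nr < n ∧ 0 ≤ nc ∧ nc < m then
    if pvCharA grid nr nc = plant then ((nr, nc) :: acc.1, acc.2) else (acc.1, acc.2 + 1)
  else (acc.1, acc.2 + 1)

-- A's 'while stack:' loop; fuel is only a totality device (proved sufficient under Pre_)
def pvRegionLoop (grid : List String) (n m : Int) (plant : Char) :
    Nat → List (Int × Int) → PySem.Set (Int × Int) → List (Int × Int) → Int →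
    Int × PySem.Set (Int × Int)
  | _, [], visited, region, perim => ((region.length : Int) * perim, visited)
  | 0, _ :: _, visited, region, perim => ((region.length : Int) * perim, visited)
  | fuel + 1, cell :: rest, visited, region, perim =>
    if PySem.Set.contains visited cell then
      pvRegionLoop grid n m plant fuel rest visited region perim
    else
      let visited' := PySem.Set.add visited cell
      let region' := region ++ [cell]
      let sp := pvDirs.foldl (pvStep grid n m plant cell) (rest, perim)
      pvRegionLoop grid n m plant fuel sp.1 visited' region' sp.2

def get_region_cost (grid : List String) (coord : Int × Int) (plant : Char)
    (visited : PySem.Set (Int × Int)) : Int × PySem.Set (Int × Int) :=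
  let n : Int := grid.length
  let m : Int := PySem.Str.len (grid.headD "")
  pvRegionLoop grid n m plant (5 * (grid.length * (grid.headD "").toList.length) + 1)
    [coord] visited [] 0

def get_total_cost (grid : List String) : Int :=
  let n : Int := grid.length
  let m : Int := PySem.Str.len (grid.headD "")
  ((PySem.List.pyRange 0 n 1).foldl (fun acc row =>
    (PySem.List.pyRange 0 m 1).foldl (fun acc col =>
      if PySem.Set.contains acc.1 (row, col) then acc
      else
        let plant := pvCharA grid row col
        let rc := get_region_cost grid (row, col) plant acc.1
        (rc.2, acc.2 + rc.1)) acc)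
    (([] : PySem.Set (Int × Int)), (0 : Int))).2

-- ===== PORT B =====

-- grid[r][c] (Nat indices); ' ' default only reached outside Pre_
def pvCharB (grid : List String) (r c : Nat) : Char := (grid.getD r "").toList.getD c ' '

-- find: follow parent links to the root; fuel is a totality device for the while loop
def ufFind (parent : List Nat) : Nat → Nat → Nat
  | 0, i => i
  | fuel + 1, i =>
    let p := parent.getD i i
    if p = i then i else ufFind parent fuel p

def ufUnion (parent : List Nat) (fuel : Nat) (a b : Nat) : List Nat :=
  let ra := ufFind parent fuel a
  let rb := ufFind parent fuel b
  if ra = rb then parent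
  else if ra < rb then parent.set rb ra else parent.set ra rb

-- first pass: union each cell with its same-plant right and down neighbour
def pvBuildParent (grid : List String) (n m : Nat) : List Nat :=
  (List.range n).foldl (fun par r =>
    (List.range m).foldl (fun par c =>
      let par1 :=
        if c + 1 < m ∧ pvCharB grid r (c + 1) = pvCharB grid r c then
          ufUnion par (n * m + 1) (r * m + c) (r * m + c + 1)
        else par
      if r + 1 < n ∧ pvCharB grid (r + 1) c = pvCharB grid r c then
        ufUnion par1 (n * m + 1) (r * m + c) ((r + 1) * m + c)
      else par1) par)
    (List.range (n * m))

-- per-cell perimeter contribution: out-of-bounds or different-plant neighbours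
def pvBoundary (grid : List String) (n m : Nat) (r c : Nat) : Int :=
  pvDirs.foldl (fun b d =>
    let nr : Int := (r : Int) + d.1
    let nc : Int := (c : Int) + d.2
    if 0 ≤ nr ∧ nr < (n : Int) ∧ 0 ≤ nc ∧ nc < (m : Int) then
      if pvCharB grid nr.toNat nc.toNat ≠ pvCharB grid r c then b + 1 else b
    else b + 1) 0

-- second pass: accumulate area and perimeter per root
def pvAgg (grid : List String) (n m : Nat) (parent : List Nat) :
    PySem.Dict Nat Int × PySem.Dict Nat Int :=
  (List.range n).foldl (fun acc r =>
    (List.range m).foldl (fun acc c =>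
      let root := ufFind parent (n * m + 1) (r * m + c)
      (acc.1.insert root (acc.1.getD root 0 + 1),
       acc.2.insert root (acc.2.getD root 0 + pvBoundary grid n m r c))) acc)
    (PySem.Dict.empty, PySem.Dict.empty)

def get_total_cost_alt (grid : List String) : Int :=
  let n := grid.length
  -- m = len(grid[0]) if grid else 0; headD gives "" (length 0) exactly on the empty grid
  let m := (grid.headD "").toList.length
  let parent := pvBuildParent grid n m
  let ap := pvAgg grid n m parent
  ap.1.items.foldl (fun s kv => s + kv.2 * ap.2.getD kv.1 0) 0

-- ===== PRECONDITION & SPEC =====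
-- Pre_ excludes exactly the inputs where the Python A raises IndexError: grids with a
-- row shorter than row 0 (grid[row][col]); the empty grid is fine (A returns 0).
def Pre_get_total_cost (grid : List String) : Prop :=
  ∀ s ∈ grid, (grid.headD "").toList.length ≤ s.toList.length
instance (grid : List String) : Decidable (Pre_get_total_cost grid) := by
  unfold Pre_get_total_cost; infer_instance

def pvWitness_get_total_cost : List String := ["AAB", "BBB"]

def Spec_get_total_cost (grid : List String) (out : Int) : Prop := out = get_total_cost_alt grid
instance (grid : List String) (out : Int) : Decidable (Spec_get_total_cost grid out) := by
  unfold Spec_get_total_cost; infer_instance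

-- ===== CLAIM (what is proved, stated in full; the proofs are below) =====
def Claim_equal_get_total_cost : Prop := ∀ (grid : List String), Dom_get_total_cost grid →
  Pre_get_total_cost grid → Spec_get_total_cost grid (get_total_cost grid)

-- ===== LEMMAS AND PROOFS =====

-- ---------- generic list lemmas ----------

theorem pvFoldl_flatMap {α β σ : Type} (l : List α) (g : α → List β) (f : σ → β → σ) (a : σ) :
    (l.flatMap g).foldl f a = l.foldl (fun a x => (g x).foldl f a) a := by
  induction l generalizing a with
  | nil => rfl
  | cons x xs ih => simp [List.flatMap_cons, List.foldl_append, ih]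

theorem pvCountP_drop_one {α : Type} [DecidableEq α] {l : List α} {x : α}
    (hl : l.Nodup) (hx : x ∈ l) (p p' : α → Bool)
    (hpx : p x = true) (hp'x : p' x = false)
    (hagree : ∀ y ∈ l, y ≠ x → p' y = p y) :
    l.countP p = l.countP p' + 1 := by
  induction l with
  | nil => cases hx
  | cons y ys ih =>
    rw [List.nodup_cons] at hl
    obtain ⟨hy, hys⟩ := hl
    rcases List.mem_cons.mp hx with rfl | hx'
    · have hys' : ys.countP p' = ys.countP p := by
        apply List.countP_congr
        intro z hz
        rw [hagree z (List.mem_cons_of_mem _ hz) (fun h => hy (h ▸ hz))]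
      simp [List.countP_cons, hpx, hp'x, hys']
    · have hyx : y ≠ x := fun h => hy (h ▸ hx')
      have h1 : p' y = p y := hagree y List.mem_cons_self hyx
      have := ih hys hx' (fun z hz hzx => hagree z (List.mem_cons_of_mem _ hz) hzx)
      simp [List.countP_cons, h1, this]
      omega

theorem pvRtg_symm {α : Type} {r : α → α → Prop} (hs : ∀ a b, r a b → r b a) :
    ∀ {a b : α}, Relation.ReflTransGen r a b → Relation.ReflTransGen r b a := by
  intro a b h
  induction h with
  | refl => exact Relation.ReflTransGen.refl
  | tail _ hbc ih => exact Relation.ReflTransGen.trans (Relation.ReflTransGen.single (hs _ _ hbc)) ih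

theorem pvSum_one_eq_length {α : Type} (l : List α) :
    (l.map (fun _ => (1 : Int))).sum = (l.length : Int) := by
  induction l with
  | nil => rfl
  | cons x xs ih => simp [ih]; ring

-- ---------- EqvGen lemmas ----------

theorem pvEqvGen_mono {α : Type} {r r' : α → α → Prop} (h : ∀ a b, r a b → r' a b)
    {a b : α} (hab : Relation.EqvGen r a b) : Relation.EqvGen r' a b := by
  induction hab with
  | rel x y hxy => exact Relation.EqvGen.rel _ _ (h _ _ hxy)
  | refl x => exact Relation.EqvGen.refl x
  | symm x y _ ih => exact Relation.EqvGen.symm _ _ ih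
  | trans x y z _ _ ih1 ih2 => exact Relation.EqvGen.trans _ _ _ ih1 ih2

theorem pvEqvGen_nil {α : Type} {a b : α}
    (h : Relation.EqvGen (fun x y => (x, y) ∈ ([] : List (α × α))) a b) : a = b := by
  induction h with
  | rel x y hxy => cases hxy
  | refl x => rfl
  | symm x y _ ih => exact ih.symm
  | trans x y z _ _ ih1 ih2 => exact ih1.trans ih2

theorem pvEqvGen_snoc {α : Type} (E : List (α × α)) (u v : α) (x y : α) :
    Relation.EqvGen (fun p q => (p, q) ∈ E ++ [(u, v)]) x y ↔
      (Relation.EqvGen (fun p q => (p, q) ∈ E) x y ∨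
       (Relation.EqvGen (fun p q => (p, q) ∈ E) x u ∧ Relation.EqvGen (fun p q => (p, q) ∈ E) v y) ∨
       (Relation.EqvGen (fun p q => (p, q) ∈ E) x v ∧ Relation.EqvGen (fun p q => (p, q) ∈ E) u y)) := by
  constructor
  · intro h
    induction h with
    | rel p q hpq =>
      rcases List.mem_append.mp hpq with hmem | hmem
      · exact Or.inl (Relation.EqvGen.rel _ _ hmem)
      · simp only [List.mem_singleton, Prod.mk.injEq] at hmem
        exact Or.inr (Or.inl ⟨hmem.1 ▸ Relation.EqvGen.refl _, hmem.2 ▸ Relation.EqvGen.refl _⟩)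
    | refl p => exact Or.inl (Relation.EqvGen.refl p)
    | symm p q _ ih =>
      rcases ih with h1 | ⟨h1, h2⟩ | ⟨h1, h2⟩
      · exact Or.inl (Relation.EqvGen.symm _ _ h1)
      · exact Or.inr (Or.inr ⟨Relation.EqvGen.symm _ _ h2, Relation.EqvGen.symm _ _ h1⟩)
      · exact Or.inr (Or.inl ⟨Relation.EqvGen.symm _ _ h2, Relation.EqvGen.symm _ _ h1⟩)
    | trans p q s _ _ ih1 ih2 =>
      rcases ih1 with h1 | ⟨h1, h2⟩ | ⟨h1, h2⟩ <;>
        rcases ih2 with h3 | ⟨h3, h4⟩ | ⟨h3, h4⟩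
      · exact Or.inl (Relation.EqvGen.trans _ _ _ h1 h3)
      · exact Or.inr (Or.inl ⟨Relation.EqvGen.trans _ _ _ h1 h3, h4⟩)
      · exact Or.inr (Or.inr ⟨Relation.EqvGen.trans _ _ _ h1 h3, h4⟩)
      · exact Or.inr (Or.inl ⟨h1, Relation.EqvGen.trans _ _ _ h2 h3⟩)
      · exact Or.inl (Relation.EqvGen.trans _ _ _ h1 (Relation.EqvGen.trans _ _ _
          (Relation.EqvGen.symm _ _ h3) (Relation.EqvGen.trans _ _ _
            (Relation.EqvGen.symm _ _ h2) h4)))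
      · exact Or.inl (Relation.EqvGen.trans _ _ _ h1 h4)
      · exact Or.inr (Or.inr ⟨h1, Relation.EqvGen.trans _ _ _ h2 h3⟩)
      · exact Or.inl (Relation.EqvGen.trans _ _ _ h1 h4)
      · exact Or.inr (Or.inr ⟨h1, h4⟩)
  · intro h
    have base : ∀ {p q : α}, Relation.EqvGen (fun p q => (p, q) ∈ E) p q →
        Relation.EqvGen (fun p q => (p, q) ∈ E ++ [(u, v)]) p q :=
      fun h' => pvEqvGen_mono (fun a b hab => List.mem_append.mpr (Or.inl hab)) h'
    have huv : Relation.EqvGen (fun p q => (p, q) ∈ E ++ [(u, v)]) u v :=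
      Relation.EqvGen.rel _ _ (List.mem_append.mpr (Or.inr (List.mem_singleton.mpr rfl)))
    rcases h with h1 | ⟨h1, h2⟩ | ⟨h1, h2⟩
    · exact base h1
    · exact Relation.EqvGen.trans _ _ _ (base h1)
        (Relation.EqvGen.trans _ _ _ huv (base h2))
    · exact Relation.EqvGen.trans _ _ _ (base h1)
        (Relation.EqvGen.trans _ _ _ (Relation.EqvGen.symm _ _ huv) (base h2))

-- ---------- union-find: abstract root function ----------

def pvParOk (P : List Nat) : Prop := ∀ j, P.getD j j ≤ j

def pvFroot (P : List Nat) (hP : pvParOk P) (i : Nat) : Nat :=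
  if h : P.getD i i = i then i else pvFroot P hP (P.getD i i)
termination_by i
decreasing_by exact lt_of_le_of_ne (hP i) h

theorem pvFroot_of_root (P : List Nat) (hP : pvParOk P) (i : Nat) (h : P.getD i i = i) :
    pvFroot P hP i = i := by
  rw [pvFroot]
  exact dif_pos h

theorem pvFroot_le (P : List Nat) (hP : pvParOk P) (i : Nat) : pvFroot P hP i ≤ i := by
  induction i using Nat.strong_induction_on with
  | _ i ih =>
    rw [pvFroot]
    split
    · exact le_refl i
    · next h =>
      exact le_trans (ih _ (lt_of_le_of_ne (hP i) h)) (hP i)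

theorem pvFroot_root (P : List Nat) (hP : pvParOk P) (i : Nat) :
    P.getD (pvFroot P hP i) (pvFroot P hP i) = pvFroot P hP i := by
  induction i using Nat.strong_induction_on with
  | _ i ih =>
    rw [pvFroot]
    split
    · next h => exact h
    · next h => exact ih _ (lt_of_le_of_ne (hP i) h)

theorem pvUfFind_eq_pvFroot (P : List Nat) (hP : pvParOk P) :
    ∀ fuel i, i < fuel → ufFind P fuel i = pvFroot P hP i := by
  intro fuel
  induction fuel with
  | zero => intro i hi; omega
  | succ f ih =>
    intro i hi
    show (if P.getD i i = i then i else ufFind P f (P.getD i i)) = _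
    rw [pvFroot]
    by_cases h : P.getD i i = i
    · rw [if_pos h, dif_pos h]
    · rw [if_neg h, dif_neg h]
      exact ih _ (lt_of_lt_of_le (lt_of_le_of_ne (hP i) h) (Nat.lt_succ_iff.mp hi))

theorem pvParOk_range (N : Nat) : pvParOk (List.range N) := by
  intro j
  by_cases h : j < N
  · simp [List.getD_eq_getElem?_getD, List.getElem?_range, h]
  · have hnone : (List.range N)[j]? = none := by
      rw [List.getElem?_eq_none_iff]; simpa using Nat.le_of_not_lt h
    simp [List.getD_eq_getElem?_getD, hnone]

theorem pvFroot_range (N : Nat) (hP : pvParOk (List.range N)) (i : Nat) :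
    pvFroot (List.range N) hP i = i := by
  apply pvFroot_of_root
  by_cases h : i < N
  · simp [List.getD_eq_getElem?_getD, List.getElem?_range, h]
  · have hnone : (List.range N)[i]? = none := by
      rw [List.getElem?_eq_none_iff]; simpa using Nat.le_of_not_lt h
    simp [List.getD_eq_getElem?_getD, hnone]

theorem pvFroot_set (P : List Nat) (hP : pvParOk P) (b r : Nat)
    (hb : b < P.length) (hrb : r < b)
    (hbroot : P.getD b b = b) (hrroot : P.getD r r = r)
    (hP' : pvParOk (P.set b r)) (i : Nat) :
    pvFroot (P.set b r) hP' i = if pvFroot P hP i = b then r else pvFroot P hP i := by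
  have hgetD : ∀ j, (P.set b r).getD j j = if j = b then r else P.getD j j := by
    intro j
    by_cases hj : j = b
    · subst hj
      simp [List.getD_eq_getElem?_getD, List.getElem?_set_self, hb]
    · simp [List.getD_eq_getElem?_getD, List.getElem?_set_ne (fun h => hj h.symm), hj]

  have hrfix : (P.set b r).getD r r = r := by
    rw [hgetD]; rw [if_neg (by omega)]; exact hrroot
  induction i using Nat.strong_induction_on with
  | _ i ih =>
    by_cases hib : i = b
    · rw [pvFroot_of_root P hP i (by rw [hib]; exact hib ▸ hbroot), if_pos hib]
      rw [pvFroot]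
      have h1 : (P.set b r).getD i i = r := by rw [hgetD, if_pos hib]
      rw [dif_neg (by rw [h1]; omega)]
      rw [h1]
      exact pvFroot_of_root _ hP' r hrfix
    · have hstep : (P.set b r).getD i i = P.getD i i := by rw [hgetD, if_neg hib]
      by_cases hroot : P.getD i i = i
      · rw [pvFroot_of_root P hP i hroot, if_neg hib]
        exact pvFroot_of_root _ hP' i (hstep.trans hroot)
      · have hlt : P.getD i i < i := lt_of_le_of_ne (hP i) hroot
        conv_lhs => rw [pvFroot]
        rw [dif_neg (by rw [hstep]; exact hroot)]
        rw [hstep]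
        rw [ih _ hlt]
        conv_rhs => rw [pvFroot]
        rw [dif_neg hroot]

-- ---------- union-find: processing an edge list ----------

def pvProcess (N : Nat) (E : List (Nat × Nat)) : List Nat :=
  E.foldl (fun P e => ufUnion P (N + 1) e.1 e.2) (List.range N)

theorem pvParOk_set (P : List Nat) (hP : pvParOk P) (b r : Nat) (hrb : r < b) :
    pvParOk (P.set b r) := by
  intro j
  by_cases hbl : b < P.length
  · by_cases hj : j = b
    · subst hj
      simp only [List.getD_eq_getElem?_getD, List.getElem?_set_self hbl, Option.getD_some]
      omega
    · have : (P.set b r)[j]? = P[j]? := List.getElem?_set_ne (fun h => hj h.symm)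
      simp only [List.getD_eq_getElem?_getD, this]
      exact hP j
  · rw [List.set_eq_of_length_le (Nat.le_of_not_lt hbl)]
    exact hP j

theorem pvStep_iff (N : Nat) (P P' : List Nat) (hP : pvParOk P) (hP' : pvParOk P')
    (u v : Nat) (huN : u < N) (hvN : v < N)
    (R S : Nat → Nat → Prop)
    (hIff : ∀ x y, x < N → y < N → (pvFroot P hP x = pvFroot P hP y ↔ R x y))
    (hS : ∀ x y, S x y ↔ (R x y ∨ (R x u ∧ R v y) ∨ (R x v ∧ R u y)))
    (hchar : ∀ i, pvFroot P' hP' i =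
      if pvFroot P hP i = pvFroot P hP u then pvFroot P hP v else pvFroot P hP i) :
    ∀ x y, x < N → y < N → (pvFroot P' hP' x = pvFroot P' hP' y ↔ S x y) := by
  intro x y hx hy
  rw [hchar x, hchar y, hS]
  rw [← hIff x y hx hy, ← hIff x u hx huN, ← hIff v y hvN hy,
      ← hIff x v hx hvN, ← hIff u y huN hy]
  split_ifs with h1 h2 h2 <;> constructor <;> intro h <;> omega

theorem pvProcess_parOk (N : Nat) (E : List (Nat × Nat))
    (hE : ∀ e ∈ E, e.1 < e.2 ∧ e.2 < N) :
    pvParOk (pvProcess N E) ∧ (pvProcess N E).length = N := by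
  clear hE
  induction E using List.reverseRecOn with
  | nil => exact ⟨pvParOk_range N, List.length_range⟩
  | append_singleton E e ih =>
    obtain ⟨hPar, hLen⟩ := ih
    have heq : pvProcess N (E ++ [e]) = ufUnion (pvProcess N E) (N + 1) e.1 e.2 := by
      show (E ++ [e]).foldl (fun P e => ufUnion P (N + 1) e.1 e.2) (List.range N) = _
      rw [List.foldl_append, List.foldl_cons, List.foldl_nil]
      rfl
    rw [heq]
    simp only [ufUnion]
    split_ifs with h1 h2
    · exact ⟨hPar, hLen⟩
    · refine ⟨pvParOk_set _ hPar _ _ h2, by rw [List.length_set]; exact hLen⟩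
    · have : ufFind (pvProcess N E) (N + 1) e.2 < ufFind (pvProcess N E) (N + 1) e.1 := by omega
      refine ⟨pvParOk_set _ hPar _ _ this, by rw [List.length_set]; exact hLen⟩

theorem pvProcess_iff (N : Nat) :
    ∀ (E : List (Nat × Nat)) (hE : ∀ e ∈ E, e.1 < e.2 ∧ e.2 < N) (a b : Nat),
      a < N → b < N →
      (pvFroot (pvProcess N E) (pvProcess_parOk N E hE).1 a =
       pvFroot (pvProcess N E) (pvProcess_parOk N E hE).1 b ↔
       Relation.EqvGen (fun x y => (x, y) ∈ E) a b) := by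
  intro E
  induction E using List.reverseRecOn with
  | nil =>
    intro hE a b ha hb
    have hchar : ∀ i (h : pvParOk (pvProcess N ([] : List (Nat × Nat)))),
        pvFroot _ h i = i := fun i h => pvFroot_range N h i
    rw [hchar a _, hchar b _]
    constructor
    · intro h; exact h ▸ Relation.EqvGen.refl a
    · exact pvEqvGen_nil
  | append_singleton E e ihE =>
    intro hE a b ha hb
    have hEsub : ∀ e' ∈ E, e'.1 < e'.2 ∧ e'.2 < N := fun e' he' =>
      hE e' (List.mem_append.mpr (Or.inl he'))
    have he : e.1 < e.2 ∧ e.2 < N := hE e (List.mem_append.mpr (Or.inr (List.mem_singleton_self e)))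
    have ih := fun a b ha hb => ihE hEsub a b ha hb
    obtain ⟨hPar, hLen⟩ := pvProcess_parOk N E hEsub
    have heq : pvProcess N (E ++ [e]) = ufUnion (pvProcess N E) (N + 1) e.1 e.2 := by
      show (E ++ [e]).foldl (fun P e => ufUnion P (N + 1) e.1 e.2) (List.range N) = _
      rw [List.foldl_append, List.foldl_cons, List.foldl_nil]
      rfl
    have h1N : e.1 < N := lt_trans he.1 he.2
    have hfind1 : ufFind (pvProcess N E) (N + 1) e.1 = pvFroot _ hPar e.1 :=
      pvUfFind_eq_pvFroot _ hPar _ _ (by omega)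
    have hfind2 : ufFind (pvProcess N E) (N + 1) e.2 = pvFroot _ hPar e.2 :=
      pvUfFind_eq_pvFroot _ hPar _ _ (by omega)
    have hsnoc := fun x y => pvEqvGen_snoc E e.1 e.2 x y
    by_cases hEq : pvFroot _ hPar e.1 = pvFroot _ hPar e.2
    · -- union is a no-op
      have hPeq : pvProcess N (E ++ [e]) = pvProcess N E := by
        rw [heq]; simp only [ufUnion]; rw [hfind1, hfind2, if_pos hEq]
      have hRab : Relation.EqvGen (fun x y => (x, y) ∈ E) e.1 e.2 :=
        (ih e.1 e.2 h1N he.2).mp hEq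
      have key : ∀ (L : List Nat) (hL : pvParOk L), L = pvProcess N E →
          (pvFroot L hL a = pvFroot L hL b ↔
            Relation.EqvGen (fun p q => (p, q) ∈ E ++ [e]) a b) := by
        rintro L hL rfl
        refine Iff.trans (ih a b ha hb) ⟨fun h => (hsnoc a b).mpr (Or.inl h), fun h => ?_⟩
        rcases (hsnoc a b).mp h with h0 | ⟨h1', h2'⟩ | ⟨h1', h2'⟩
        · exact h0
        · exact Relation.EqvGen.trans _ _ _ h1' (Relation.EqvGen.trans _ _ _ hRab h2')
        · exact Relation.EqvGen.trans _ _ _ h1'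
            (Relation.EqvGen.trans _ _ _ (Relation.EqvGen.symm _ _ hRab) h2')
      exact key _ _ hPeq
    · -- real merge
      have hraN : pvFroot _ hPar e.1 < N := lt_of_le_of_lt (pvFroot_le _ _ _) h1N
      have hrbN : pvFroot _ hPar e.2 < N := lt_of_le_of_lt (pvFroot_le _ _ _) he.2
      have hraroot := pvFroot_root _ hPar e.1
      have hrbroot := pvFroot_root _ hPar e.2
      by_cases hlt : pvFroot _ hPar e.1 < pvFroot _ hPar e.2
      · -- parent[rb] := ra
        have hPeq : pvProcess N (E ++ [e]) =
            (pvProcess N E).set (pvFroot _ hPar e.2) (pvFroot _ hPar e.1) := by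
          rw [heq]; simp only [ufUnion]; rw [hfind1, hfind2, if_neg hEq, if_pos hlt]
        have hP'par : pvParOk ((pvProcess N E).set (pvFroot _ hPar e.2) (pvFroot _ hPar e.1)) :=
          pvParOk_set _ hPar _ _ hlt
        have hchar := pvFroot_set (pvProcess N E) hPar _ _ (by rw [hLen]; exact hrbN) hlt
          hrbroot hraroot hP'par
        have hiff2 := pvStep_iff N (pvProcess N E) _ hPar hP'par e.2 e.1 he.2 h1N
          (fun x y => Relation.EqvGen (fun p q => (p, q) ∈ E) x y)
          (fun x y => Relation.EqvGen (fun p q => (p, q) ∈ E ++ [e]) x y)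
          ih
          (fun x y => ⟨fun h => by have := (hsnoc x y).mp h; tauto,
                       fun h => (hsnoc x y).mpr (by tauto)⟩)
          hchar
        have key : ∀ (L : List Nat) (hL : pvParOk L),
            L = (pvProcess N E).set (pvFroot _ hPar e.2) (pvFroot _ hPar e.1) →
            (pvFroot L hL a = pvFroot L hL b ↔
              Relation.EqvGen (fun p q => (p, q) ∈ E ++ [e]) a b) := by
          rintro L hL rfl
          exact hiff2 a b ha hb
        exact key _ _ hPeq
      · -- parent[ra] := rb
        have hlt' : pvFroot _ hPar e.2 < pvFroot _ hPar e.1 := by omega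
        have hPeq : pvProcess N (E ++ [e]) =
            (pvProcess N E).set (pvFroot _ hPar e.1) (pvFroot _ hPar e.2) := by
          rw [heq]; simp only [ufUnion]; rw [hfind1, hfind2, if_neg hEq, if_neg hlt]
        have hP'par : pvParOk ((pvProcess N E).set (pvFroot _ hPar e.1) (pvFroot _ hPar e.2)) :=
          pvParOk_set _ hPar _ _ hlt'
        have hchar := pvFroot_set (pvProcess N E) hPar _ _ (by rw [hLen]; exact hraN) hlt'
          hraroot hrbroot hP'par
        have hiff2 := pvStep_iff N (pvProcess N E) _ hPar hP'par e.1 e.2 h1N he.2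
          (fun x y => Relation.EqvGen (fun p q => (p, q) ∈ E) x y)
          (fun x y => Relation.EqvGen (fun p q => (p, q) ∈ E ++ [e]) x y)
          ih
          (fun x y => ⟨fun h => by have := (hsnoc x y).mp h; tauto,
                       fun h => (hsnoc x y).mpr (by tauto)⟩)
          hchar
        have key : ∀ (L : List Nat) (hL : pvParOk L),
            L = (pvProcess N E).set (pvFroot _ hPar e.1) (pvFroot _ hPar e.2) →
            (pvFroot L hL a = pvFroot L hL b ↔
              Relation.EqvGen (fun p q => (p, q) ∈ E ++ [e]) a b) := by
          rintro L hL rfl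
          exact hiff2 a b ha hb
        exact key _ _ hPeq

-- ---------- grid abbreviations ----------

def pvN (grid : List String) : Nat := grid.length
def pvM (grid : List String) : Nat := (grid.headD "").toList.length
def pvNM (grid : List String) : Nat := pvN grid * pvM grid

def pvEdges (grid : List String) : List (Nat × Nat) :=
  (List.range (pvN grid)).flatMap (fun r =>
    (List.range (pvM grid)).flatMap (fun c =>
      (if c + 1 < pvM grid ∧ pvCharB grid r (c + 1) = pvCharB grid r c then
        [(r * pvM grid + c, r * pvM grid + c + 1)] else []) ++
      (if r + 1 < pvN grid ∧ pvCharB grid (r + 1) c = pvCharB grid r c then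
        [(r * pvM grid + c, (r + 1) * pvM grid + c)] else [])))

theorem pvFoldl_two_opt {σ α : Type} (c1 c2 : Prop) [Decidable c1] [Decidable c2]
    (e1 e2 : α) (f : σ → α → σ) (a : σ) :
    ((if c1 then [e1] else []) ++ (if c2 then [e2] else [])).foldl f a =
      (if c2 then f (if c1 then f a e1 else a) e2 else (if c1 then f a e1 else a)) := by
  split_ifs <;> rfl

theorem pvMulBound (r c n m : Nat) (hr : r < n) (hc : c < m) : r * m + c < n * m := by
  calc r * m + c < r * m + m := by omega
    _ = (r + 1) * m := by ring
    _ ≤ n * m := Nat.mul_le_mul_right m hr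

theorem pvBuildParent_eq (grid : List String) :
    pvBuildParent grid (pvN grid) (pvM grid) = pvProcess (pvNM grid) (pvEdges grid) := by
  unfold pvBuildParent pvProcess pvEdges pvNM
  simp only [pvFoldl_flatMap, pvFoldl_two_opt]

theorem pvEdges_bound (grid : List String) :
    ∀ e ∈ pvEdges grid, e.1 < e.2 ∧ e.2 < pvNM grid := by
  intro e he
  unfold pvEdges at he
  rw [List.mem_flatMap] at he
  obtain ⟨r, hr, he⟩ := he
  rw [List.mem_flatMap] at he
  obtain ⟨c, hc, he⟩ := he
  rw [List.mem_range] at hr hc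
  rw [List.mem_append] at he
  unfold pvNM
  rcases he with he | he
  · split at he
    · next hcond =>
      rw [List.mem_singleton] at he
      subst he
      refine ⟨by omega, ?_⟩
      show r * pvM grid + c + 1 < pvN grid * pvM grid
      have := pvMulBound r (c + 1) (pvN grid) (pvM grid) hr hcond.1
      omega
    · cases he
  · split at he
    · next hcond =>
      rw [List.mem_singleton] at he
      subst he
      constructor
      · show r * pvM grid + c < (r + 1) * pvM grid + c
        have h1 : (r + 1) * pvM grid = r * pvM grid + pvM grid := by ring
        omega
      · exact pvMulBound (r + 1) c (pvN grid) (pvM grid) hcond.1 hc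
    · cases he

def pvRoot (grid : List String) (i : Nat) : Nat :=
  ufFind (pvBuildParent grid (pvN grid) (pvM grid)) (pvNM grid + 1) i

theorem pvRoot_eq_froot (grid : List String) (i : Nat) (hi : i < pvNM grid + 1) :
    pvRoot grid i =
      pvFroot (pvProcess (pvNM grid) (pvEdges grid))
        (pvProcess_parOk (pvNM grid) (pvEdges grid) (pvEdges_bound grid)).1 i := by
  unfold pvRoot
  rw [pvBuildParent_eq]
  exact pvUfFind_eq_pvFroot _ _ _ _ hi

theorem pvRoot_iff (grid : List String) (a b : Nat) (ha : a < pvNM grid) (hb : b < pvNM grid) :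
    (pvRoot grid a = pvRoot grid b ↔
     Relation.EqvGen (fun x y => (x, y) ∈ pvEdges grid) a b) := by
  rw [pvRoot_eq_froot grid a (by omega), pvRoot_eq_froot grid b (by omega)]
  exact pvProcess_iff (pvNM grid) (pvEdges grid) (pvEdges_bound grid) a b ha hb

-- ---------- pair world ----------

def pvValid (grid : List String) (p : Int × Int) : Bool :=
  decide (0 ≤ p.1 ∧ p.1 < (pvN grid : Int) ∧ 0 ≤ p.2 ∧ p.2 < (pvM grid : Int))

def pvIdx (grid : List String) (p : Int × Int) : Nat := p.1.toNat * pvM grid + p.2.toNat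

def pvRt (grid : List String) (p : Int × Int) : Nat := pvRoot grid (pvIdx grid p)

def pvAdj (grid : List String) (p q : Int × Int) : Prop :=
  pvValid grid p = true ∧ pvValid grid q = true ∧
  (∃ d ∈ pvDirs, q = (p.1 + d.1, p.2 + d.2)) ∧
  pvCharA grid q.1 q.2 = pvCharA grid p.1 p.2

def pvCells (grid : List String) : List (Nat × Nat) :=
  (List.range (pvN grid)).flatMap (fun r => (List.range (pvM grid)).map (fun c => (r, c)))

def pvPairs (grid : List String) : List (Int × Int) :=
  (pvCells grid).map (fun rc => ((rc.1 : Int), (rc.2 : Int)))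

def pvBdryP (grid : List String) (p : Int × Int) : Int :=
  pvBoundary grid (pvN grid) (pvM grid) p.1.toNat p.2.toNat

def pvCls (grid : List String) (k : Nat) : List (Int × Int) :=
  (pvPairs grid).filter (fun q => pvRt grid q == k)

def pvTerm (grid : List String) (k : Nat) : Int :=
  ((pvCls grid k).length : Int) * ((pvCls grid k).map (pvBdryP grid)).sum

def pvPartial (grid : List String) (ks : List Nat) : Int :=
  ((PySem.List.dedup ks).map (pvTerm grid)).sum

def pvGrand (grid : List String) : Int := pvPartial grid ((pvPairs grid).map (pvRt grid))

theorem pvCells_mem (grid : List String) (rc : Nat × Nat) :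
    rc ∈ pvCells grid ↔ rc.1 < pvN grid ∧ rc.2 < pvM grid := by
  unfold pvCells
  simp only [List.mem_flatMap, List.mem_map, List.mem_range]
  constructor
  · rintro ⟨r, hr, c, hc, rfl⟩
    exact ⟨hr, hc⟩
  · rintro ⟨h1, h2⟩
    exact ⟨rc.1, h1, rc.2, h2, rfl⟩

theorem pvCells_nodup (grid : List String) : (pvCells grid).Nodup := by
  have heq : pvCells grid = List.range (pvN grid) ×ˢ List.range (pvM grid) := rfl
  rw [heq]
  exact List.Nodup.product List.nodup_range List.nodup_range

theorem pvPairs_mem (grid : List String) (p : Int × Int) :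
    p ∈ pvPairs grid ↔ pvValid grid p = true := by
  unfold pvPairs pvValid
  rw [List.mem_map]
  constructor
  · rintro ⟨rc, hrc, rfl⟩
    rw [pvCells_mem] at hrc
    simp only [decide_eq_true_eq]
    refine ⟨by positivity, by exact_mod_cast hrc.1, by positivity, by exact_mod_cast hrc.2⟩
  · intro h
    simp only [decide_eq_true_eq] at h
    refine ⟨(p.1.toNat, p.2.toNat), ?_, ?_⟩
    · rw [pvCells_mem]
      constructor
      · show p.1.toNat < pvN grid
        omega
      · show p.2.toNat < pvM grid
        omega
    · show ((p.1.toNat : Int), (p.2.toNat : Int)) = p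
      have h1 : (p.1.toNat : Int) = p.1 := Int.toNat_of_nonneg h.1
      have h2 : (p.2.toNat : Int) = p.2 := Int.toNat_of_nonneg h.2.2.1
      rw [h1, h2]

theorem pvPairs_nodup (grid : List String) : (pvPairs grid).Nodup := by
  apply (pvCells_nodup grid).map
  intro a b h
  rw [Prod.mk.injEq] at h
  ext
  · exact_mod_cast h.1
  · exact_mod_cast h.2

theorem pvPairs_length (grid : List String) : (pvPairs grid).length = pvNM grid := by
  unfold pvPairs pvCells pvNM
  rw [List.length_map, List.length_flatMap]
  simp [List.map_const']

theorem pvIdx_lt (grid : List String) (p : Int × Int) (hp : pvValid grid p = true) :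
    pvIdx grid p < pvNM grid := by
  unfold pvValid at hp
  simp only [decide_eq_true_eq] at hp
  unfold pvIdx pvNM
  exact pvMulBound _ _ _ _ (by omega) (by omega)

-- decode r*m+c back to (r, c)
theorem pvIdx_decode (grid : List String) (r c : Nat) (hc : c < pvM grid) :
    (r * pvM grid + c) / pvM grid = r ∧ (r * pvM grid + c) % pvM grid = c := by
  have m0 : 0 < pvM grid := lt_of_le_of_lt (Nat.zero_le c) hc
  constructor
  · rw [Nat.add_comm, Nat.add_mul_div_right _ _ m0, Nat.div_eq_of_lt hc]
    omega
  · rw [Nat.add_comm, Nat.add_mul_mod_self_right, Nat.mod_eq_of_lt hc]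

theorem pvCharAB (grid : List String) (hPre : Pre_get_total_cost grid) (p : Int × Int)
    (hp : pvValid grid p = true) :
    pvCharA grid p.1 p.2 = pvCharB grid p.1.toNat p.2.toNat := by
  unfold pvValid at hp
  simp only [decide_eq_true_eq] at hp
  obtain ⟨h1, h2, h3, h4⟩ := hp
  have hrN : p.1.toNat < pvN grid := by omega
  have hr : p.1.toNat < grid.length := hrN
  have hrow : grid[p.1.toNat] ∈ grid := List.getElem_mem hr
  have hlen : pvM grid ≤ grid[p.1.toNat].toList.length := hPre _ hrow
  have hcM : p.2.toNat < pvM grid := by omega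
  have hc : p.2.toNat < grid[p.1.toNat].toList.length := by omega
  unfold pvCharA
  rw [PySem.List.pyGet?_eq_some_getElem grid h1 (by exact h2)]
  have hstr : PySem.Str.pyGet? grid[p.1.toNat] p.2 =
      some grid[p.1.toNat].toList[p.2.toNat] :=
    PySem.List.pyGet?_eq_some_getElem _ h3 (by omega)
  rw [show ((some grid[p.1.toNat]).bind fun s => PySem.Str.pyGet? s p.2) =
        PySem.Str.pyGet? grid[p.1.toNat] p.2 from rfl, hstr, Option.getD_some]
  unfold pvCharB
  have hgg : grid.getD p.1.toNat "" = grid[p.1.toNat] := List.getD_eq_getElem _ _ hr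
  rw [hgg]
  exact (List.getD_eq_getElem _ _ hc).symm

theorem pvAdj_symm (grid : List String) {p q : Int × Int} (h : pvAdj grid p q) : pvAdj grid q p := by
  obtain ⟨hp, hq, ⟨d, hd, hpd⟩, hchar⟩ := h
  refine ⟨hq, hp, ⟨(-d.1, -d.2), ?_, ?_⟩, hchar.symm⟩
  · simp only [pvDirs, List.mem_cons, List.not_mem_nil, or_false] at hd ⊢
    rcases hd with rfl | rfl | rfl | rfl <;> simp
  · rw [hpd]
    ext <;> simp <;> ring

-- a single right or down step is an edge of pvEdges, hence roots agree
theorem pvEdge_rt (grid : List String) (hPre : Pre_get_total_cost grid) (p q : Int × Int)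
    (hp : pvValid grid p = true) (hq : pvValid grid q = true)
    (hchar : pvCharA grid q.1 q.2 = pvCharA grid p.1 p.2)
    (hpq : (q.1 = p.1 ∧ q.2 = p.2 + 1) ∨ (q.1 = p.1 + 1 ∧ q.2 = p.2)) :
    pvRt grid p = pvRt grid q := by
  have hpv := hp; have hqv := hq
  unfold pvValid at hpv hqv
  simp only [decide_eq_true_eq] at hpv hqv
  have hAB := pvCharAB grid hPre p hp
  have hAB' := pvCharAB grid hPre q hq
  have hB : pvCharB grid q.1.toNat q.2.toNat = pvCharB grid p.1.toNat p.2.toNat := by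
    rw [← hAB, ← hAB', hchar]
  apply (pvRoot_iff grid _ _ (pvIdx_lt grid p hp) (pvIdx_lt grid q hq)).mpr
  apply Relation.EqvGen.rel
  unfold pvEdges
  rw [List.mem_flatMap]
  refine ⟨p.1.toNat, List.mem_range.mpr (by omega), ?_⟩
  rw [List.mem_flatMap]
  refine ⟨p.2.toNat, List.mem_range.mpr (by omega), ?_⟩
  rw [List.mem_append]
  rcases hpq with ⟨hq1, hq2⟩ | ⟨hq1, hq2⟩
  · left
    have hqt1 : q.1.toNat = p.1.toNat := by omega
    have hqt2 : q.2.toNat = p.2.toNat + 1 := by omega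
    have hcond : p.2.toNat + 1 < pvM grid ∧
        pvCharB grid p.1.toNat (p.2.toNat + 1) = pvCharB grid p.1.toNat p.2.toNat := by
      refine ⟨by omega, ?_⟩
      have hB2 := hB
      rw [hqt1, hqt2] at hB2
      exact hB2
    rw [if_pos hcond, List.mem_singleton]
    unfold pvIdx
    rw [hqt1, hqt2]
    simp [Prod.ext_iff]
    omega
  · right
    have hqt1 : q.1.toNat = p.1.toNat + 1 := by omega
    have hqt2 : q.2.toNat = p.2.toNat := by omega
    have hcond : p.1.toNat + 1 < pvN grid ∧
        pvCharB grid (p.1.toNat + 1) p.2.toNat = pvCharB grid p.1.toNat p.2.toNat := by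
      refine ⟨by omega, ?_⟩
      have hB2 := hB
      rw [hqt1, hqt2] at hB2
      exact hB2
    rw [if_pos hcond, List.mem_singleton]
    unfold pvIdx
    rw [hqt1, hqt2]

theorem pvAdj_rt (grid : List String) (hPre : Pre_get_total_cost grid) {p q : Int × Int}
    (h : pvAdj grid p q) : pvRt grid p = pvRt grid q := by
  obtain ⟨hp, hq, ⟨d, hd, hpd⟩, hchar⟩ := h
  simp only [pvDirs, List.mem_cons, List.not_mem_nil, or_false] at hd
  rcases hd with rfl | rfl | rfl | rfl
  · -- d = (-1, 0): p is down-step of q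
    refine (pvEdge_rt grid hPre q p hq hp ?_ (Or.inr ?_)).symm
    · exact hchar.symm
    · rw [hpd]; constructor <;> simp <;> ring
  · -- d = (1, 0)
    refine pvEdge_rt grid hPre p q hp hq hchar (Or.inr ?_)
    rw [hpd]; constructor <;> simp
  · -- d = (0, -1): p is right-step of q
    refine (pvEdge_rt grid hPre q p hq hp ?_ (Or.inl ?_)).symm
    · exact hchar.symm
    · rw [hpd]; constructor <;> simp <;> ring
  · -- d = (0, 1)
    refine pvEdge_rt grid hPre p q hp hq hchar (Or.inl ?_)
    rw [hpd]; constructor <;> simp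

def pvDec (grid : List String) (i : Nat) : Int × Int :=
  ((i / pvM grid : Nat), (i % pvM grid : Nat))

theorem pvValid_cast (grid : List String) (r c : Nat) (h1 : r < pvN grid) (h2 : c < pvM grid) :
    pvValid grid ((r : Int), (c : Int)) = true := by
  unfold pvValid
  simp only [decide_eq_true_eq]
  refine ⟨by positivity, by exact_mod_cast h1, by positivity, by exact_mod_cast h2⟩

theorem pvDec_idx (grid : List String) (p : Int × Int) (hp : pvValid grid p = true) :
    pvDec grid (pvIdx grid p) = p := by
  have hpv := hp
  unfold pvValid at hpv
  simp only [decide_eq_true_eq] at hpv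
  have hc : p.2.toNat < pvM grid := by omega
  obtain ⟨hd1, hd2⟩ := pvIdx_decode grid p.1.toNat p.2.toNat hc
  unfold pvDec pvIdx
  rw [hd1, hd2]
  ext
  · exact Int.toNat_of_nonneg hpv.1
  · exact Int.toNat_of_nonneg hpv.2.2.1

theorem pvEdge_adj (grid : List String) (hPre : Pre_get_total_cost grid) (i j : Nat)
    (hij : (i, j) ∈ pvEdges grid) : pvAdj grid (pvDec grid i) (pvDec grid j) := by
  unfold pvEdges at hij
  rw [List.mem_flatMap] at hij
  obtain ⟨r, hr, hij⟩ := hij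
  rw [List.mem_flatMap] at hij
  obtain ⟨c, hc, hij⟩ := hij
  rw [List.mem_range] at hr hc
  rw [List.mem_append] at hij
  rcases hij with hij | hij
  · split at hij
    · next hcond =>
      rw [List.mem_singleton, Prod.mk.injEq] at hij
      obtain ⟨rfl, rfl⟩ := hij
      obtain ⟨hd1, hd2⟩ := pvIdx_decode grid r c (by omega)
      have hplus : r * pvM grid + c + 1 = r * pvM grid + (c + 1) := by omega
      obtain ⟨hd3, hd4⟩ := pvIdx_decode grid r (c + 1) hcond.1
      unfold pvDec
      rw [hd1, hd2, hplus, hd3, hd4]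
      have hv1 := pvValid_cast grid r c hr (by omega)
      have hv2 := pvValid_cast grid r (c + 1) hr hcond.1
      refine ⟨hv1, hv2, ⟨(0, 1), by simp [pvDirs], by ext <;> push_cast <;> ring⟩, ?_⟩
      have e1 := pvCharAB grid hPre ((r : Int), (c : Int)) hv1
      have e2 := pvCharAB grid hPre ((r : Int), ((c + 1 : Nat) : Int)) hv2
      simp only [Int.toNat_natCast] at e1 e2
      show pvCharA grid ((r : Nat) : Int) (((c + 1 : Nat) : Nat) : Int) =
        pvCharA grid ((r : Nat) : Int) ((c : Nat) : Int)
      rw [e1, e2, hcond.2]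
    · cases hij
  · split at hij
    · next hcond =>
      rw [List.mem_singleton, Prod.mk.injEq] at hij
      obtain ⟨rfl, rfl⟩ := hij
      obtain ⟨hd1, hd2⟩ := pvIdx_decode grid r c hc
      obtain ⟨hd3, hd4⟩ := pvIdx_decode grid (r + 1) c hc
      unfold pvDec
      rw [hd1, hd2, hd3, hd4]
      have hv1 := pvValid_cast grid r c (by omega) hc
      have hv2 := pvValid_cast grid (r + 1) c hcond.1 hc
      refine ⟨hv1, hv2, ⟨(1, 0), by simp [pvDirs], by ext <;> push_cast <;> ring⟩, ?_⟩
      have e1 := pvCharAB grid hPre ((r : Int), (c : Int)) hv1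
      have e2 := pvCharAB grid hPre (((r + 1 : Nat) : Int), ((c : Nat) : Int)) hv2
      simp only [Int.toNat_natCast] at e1 e2
      show pvCharA grid (((r + 1 : Nat) : Nat) : Int) ((c : Nat) : Int) =
        pvCharA grid ((r : Nat) : Int) ((c : Nat) : Int)
      rw [e1, e2, hcond.2]
    · cases hij

theorem pvRt_conn (grid : List String) (hPre : Pre_get_total_cost grid) {p q : Int × Int}
    (hp : pvValid grid p = true) (hq : pvValid grid q = true) (h : pvRt grid p = pvRt grid q) :
    Relation.ReflTransGen (pvAdj grid) p q := by
  have hEq : Relation.EqvGen (fun x y => (x, y) ∈ pvEdges grid) (pvIdx grid p) (pvIdx grid q) :=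
    (pvRoot_iff grid _ _ (pvIdx_lt grid p hp) (pvIdx_lt grid q hq)).mp h
  have key : ∀ a b, Relation.EqvGen (fun x y => (x, y) ∈ pvEdges grid) a b →
      Relation.ReflTransGen (pvAdj grid) (pvDec grid a) (pvDec grid b) := by
    intro a b hab
    induction hab with
    | rel x y hxy => exact Relation.ReflTransGen.single (pvEdge_adj grid hPre x y hxy)
    | refl x => exact Relation.ReflTransGen.refl
    | symm x y _ ih => exact pvRtg_symm (fun _ _ => pvAdj_symm grid) ih
    | trans x y z _ _ ih1 ih2 => exact Relation.ReflTransGen.trans ih1 ih2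
  have h1 := key _ _ hEq
  rwa [pvDec_idx grid p hp, pvDec_idx grid q hq] at h1

theorem pvRt_char (grid : List String) (hPre : Pre_get_total_cost grid) {p q : Int × Int}
    (hp : pvValid grid p = true) (hq : pvValid grid q = true) (h : pvRt grid p = pvRt grid q) :
    pvCharA grid q.1 q.2 = pvCharA grid p.1 p.2 := by
  have aux : ∀ a b : Int × Int, Relation.ReflTransGen (pvAdj grid) a b →
      pvCharA grid b.1 b.2 = pvCharA grid a.1 a.2 := by
    intro a b hab
    induction hab with
    | refl => rfl
    | tail _ hbc ih => exact hbc.2.2.2.trans ih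
  exact aux p q (pvRt_conn grid hPre hp hq h)

-- ---------- A side: the direction fold and the region loop ----------

def pvGood (grid : List String) (χ : Char) (cell d : Int × Int) : Bool :=
  decide (0 ≤ cell.1 + d.1 ∧ cell.1 + d.1 < (pvN grid : Int) ∧
          0 ≤ cell.2 + d.2 ∧ cell.2 + d.2 < (pvM grid : Int)) &&
  decide (pvCharA grid (cell.1 + d.1) (cell.2 + d.2) = χ)

theorem pvStep_fold (grid : List String) (χ : Char) (cell : Int × Int) :
    ∀ (dirs : List (Int × Int)) (acc : List (Int × Int) × Int),
      dirs.foldl (pvStep grid (pvN grid : Int) (pvM grid : Int) χ cell) acc =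
        (((dirs.filter (pvGood grid χ cell)).reverse.map
            (fun d => (cell.1 + d.1, cell.2 + d.2))) ++ acc.1,
         acc.2 + ((dirs.filter (fun d => !pvGood grid χ cell d)).length : Int)) := by
  intro dirs
  induction dirs with
  | nil => intro acc; simp
  | cons d dirs ih =>
    intro acc
    rw [List.foldl_cons]
    by_cases h1 : 0 ≤ cell.1 + d.1 ∧ cell.1 + d.1 < (pvN grid : Int) ∧
        0 ≤ cell.2 + d.2 ∧ cell.2 + d.2 < (pvM grid : Int)
    · by_cases h2 : pvCharA grid (cell.1 + d.1) (cell.2 + d.2) = χ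
      · have hg : pvGood grid χ cell d = true := by
          unfold pvGood; rw [decide_eq_true h1, decide_eq_true h2]; rfl
        have hstep : pvStep grid (pvN grid : Int) (pvM grid : Int) χ cell acc d =
            ((cell.1 + d.1, cell.2 + d.2) :: acc.1, acc.2) := by
          unfold pvStep; rw [if_pos h1, if_pos h2]
        rw [hstep, ih]
        simp [List.filter_cons, hg]
      · have hg : pvGood grid χ cell d = false := by
          unfold pvGood; rw [decide_eq_false h2]; simp
        have hstep : pvStep grid (pvN grid : Int) (pvM grid : Int) χ cell acc d =
            (acc.1, acc.2 + 1) := by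
          unfold pvStep; rw [if_pos h1, if_neg h2]
        rw [hstep, ih]
        simp [List.filter_cons, hg]
        ring
    · have hg : pvGood grid χ cell d = false := by
        unfold pvGood; rw [decide_eq_false h1]; simp
      have hstep : pvStep grid (pvN grid : Int) (pvM grid : Int) χ cell acc d =
          (acc.1, acc.2 + 1) := by
        unfold pvStep; rw [if_neg h1]
      rw [hstep, ih]
      simp [List.filter_cons, hg]
      ring

theorem pvBdry_count (grid : List String) (hPre : Pre_get_total_cost grid) (cell : Int × Int)
    (hcell : pvValid grid cell = true) :
    ((pvDirs.filter (fun d => !pvGood grid (pvCharA grid cell.1 cell.2) cell d)).length : Int) =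
      pvBdryP grid cell := by
  have hcv := hcell
  unfold pvValid at hcv
  simp only [decide_eq_true_eq] at hcv
  have hr : (cell.1.toNat : Int) = cell.1 := Int.toNat_of_nonneg hcv.1
  have hc : (cell.2.toNat : Int) = cell.2 := Int.toNat_of_nonneg hcv.2.2.1
  -- characterize pvBoundary as a bad-direction count
  have hfold : ∀ (dirs : List (Int × Int)) (b : Int),
      dirs.foldl (fun b d =>
        let nr : Int := (cell.1.toNat : Int) + d.1
        let nc : Int := (cell.2.toNat : Int) + d.2
        if 0 ≤ nr ∧ nr < (pvN grid : Int) ∧ 0 ≤ nc ∧ nc < (pvM grid : Int) then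
          if pvCharB grid nr.toNat nc.toNat ≠ pvCharB grid cell.1.toNat cell.2.toNat then b + 1
          else b
        else b + 1) b =
      b + ((dirs.filter (fun d => !pvGood grid (pvCharA grid cell.1 cell.2) cell d)).length : Int) := by
    intro dirs
    induction dirs with
    | nil => intro b; simp
    | cons d dirs ih =>
      intro b
      rw [List.foldl_cons]
      have hnr : (cell.1.toNat : Int) + d.1 = cell.1 + d.1 := by rw [hr]
      have hnc : (cell.2.toNat : Int) + d.2 = cell.2 + d.2 := by rw [hc]
      by_cases h1 : 0 ≤ cell.1 + d.1 ∧ cell.1 + d.1 < (pvN grid : Int) ∧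
          0 ≤ cell.2 + d.2 ∧ cell.2 + d.2 < (pvM grid : Int)
      · have hvq : pvValid grid (cell.1 + d.1, cell.2 + d.2) = true := by
          unfold pvValid; simp only [decide_eq_true_eq]; exact h1
        have hAB := pvCharAB grid hPre (cell.1 + d.1, cell.2 + d.2) hvq
        have hAB0 := pvCharAB grid hPre cell hcell
        have hchareq : (pvCharB grid ((cell.1.toNat : Int) + d.1).toNat
              ((cell.2.toNat : Int) + d.2).toNat = pvCharB grid cell.1.toNat cell.2.toNat) ↔
            (pvCharA grid (cell.1 + d.1) (cell.2 + d.2) = pvCharA grid cell.1 cell.2) := by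
          rw [hnr, hnc, ← hAB0]
          rw [show pvCharA grid (cell.1 + d.1) (cell.2 + d.2) =
            pvCharB grid (cell.1 + d.1).toNat (cell.2 + d.2).toNat from hAB]
        by_cases h2 : pvCharA grid (cell.1 + d.1) (cell.2 + d.2) = pvCharA grid cell.1 cell.2
        · have hg : pvGood grid (pvCharA grid cell.1 cell.2) cell d = true := by
            unfold pvGood; rw [decide_eq_true h1, decide_eq_true h2]; rfl
          rw [if_pos (by rw [hnr, hnc]; exact h1), if_neg (by
            simp only [ne_eq, not_not]
            exact hchareq.mpr h2)]
          rw [ih]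
          simp [List.filter_cons, hg]
        · have hg : pvGood grid (pvCharA grid cell.1 cell.2) cell d = false := by
            unfold pvGood; rw [decide_eq_false h2]; simp
          rw [if_pos (by rw [hnr, hnc]; exact h1), if_pos (by
            simp only [ne_eq]
            exact fun hcontra => h2 (hchareq.mp hcontra))]
          rw [ih]
          simp [List.filter_cons, hg]
          ring
      · have hg : pvGood grid (pvCharA grid cell.1 cell.2) cell d = false := by
          unfold pvGood; rw [decide_eq_false h1]; simp
        rw [if_neg (by rw [hnr, hnc]; exact h1)]
        rw [ih]
        simp [List.filter_cons, hg]
        ring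
  unfold pvBdryP pvBoundary
  rw [hfold pvDirs 0]
  omega

theorem pvContains_congr (s t : PySem.Set (Int × Int)) (x : Int × Int)
    (h : x ∈ s ↔ x ∈ t) : PySem.Set.contains s x = PySem.Set.contains t x := by
  rw [Bool.eq_iff_iff, PySem.Set.contains_iff, PySem.Set.contains_iff]
  exact h

theorem pvCls_nodup (grid : List String) (k : Nat) : (pvCls grid k).Nodup :=
  (pvPairs_nodup grid).filter _

theorem pvCls_mem (grid : List String) (k : Nat) (q : Int × Int) :
    q ∈ pvCls grid k ↔ (pvValid grid q = true ∧ pvRt grid q = k) := by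
  unfold pvCls
  rw [List.mem_filter, pvPairs_mem]
  simp

theorem pvRegion_base (grid : List String) (hPre : Pre_get_total_cost grid) (p0 : Int × Int)
    (hp0 : pvValid grid p0 = true) (fuel : Nat) (V : PySem.Set (Int × Int))
    (reg : List (Int × Int)) (π : Int)
    (hV : V.Nodup) (hreg : reg.Nodup)
    (hregC : ∀ q ∈ reg, pvValid grid q = true ∧ pvRt grid q = pvRt grid p0)
    (hVC : ∀ q, pvValid grid q = true → pvRt grid q = pvRt grid p0 → (q ∈ V ↔ q ∈ reg))
    (hclo : ∀ q ∈ reg, ∀ q', pvAdj grid q q' → q' ∈ reg ∨ q' ∈ ([] : List (Int × Int)))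
    (hp0reg : p0 ∈ reg) (hπ : π = (reg.map (pvBdryP grid)).sum) :
    ∃ Vout : PySem.Set (Int × Int),
      pvRegionLoop grid (pvN grid : Int) (pvM grid : Int) (pvCharA grid p0.1 p0.2)
          fuel [] V reg π = (pvTerm grid (pvRt grid p0), Vout) ∧
      Vout.Nodup ∧
      (∀ q, q ∈ Vout ↔ q ∈ V ∨ (pvValid grid q = true ∧ pvRt grid q = pvRt grid p0)) := by
  have hcls : ∀ q, pvValid grid q = true → pvRt grid q = pvRt grid p0 → q ∈ reg := by
    intro q hqv hqr
    have hconn := pvRt_conn grid hPre hp0 hqv hqr.symm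
    clear hqv hqr
    induction hconn with
    | refl => exact hp0reg
    | tail _ hbc ihc =>
      exact ((hclo _ ihc _ hbc).resolve_right List.not_mem_nil)
  have hperm : reg.Perm (pvCls grid (pvRt grid p0)) := by
    rw [List.perm_ext_iff_of_nodup hreg (pvCls_nodup grid _)]
    intro q
    rw [pvCls_mem]
    exact ⟨fun hq => hregC q hq, fun hq => hcls q hq.1 hq.2⟩
  refine ⟨V, ?_, hV, ?_⟩
  · have hbody : pvRegionLoop grid (pvN grid : Int) (pvM grid : Int)
        (pvCharA grid p0.1 p0.2) fuel [] V reg π = ((reg.length : Int) * π, V) := by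
      cases fuel <;> rfl
    rw [hbody, hπ, hperm.length_eq, (hperm.map (pvBdryP grid)).sum_eq]
    rfl
  · intro q
    constructor
    · exact Or.inl
    · rintro (hq | hq)
      · exact hq
      · exact (hVC q hq.1 hq.2).mpr (hcls q hq.1 hq.2)

theorem pvRegion_spec (grid : List String) (hPre : Pre_get_total_cost grid) (p0 : Int × Int)
    (hp0 : pvValid grid p0 = true) :
    ∀ (fuel : Nat) (st : List (Int × Int)) (V : PySem.Set (Int × Int))
      (reg : List (Int × Int)) (π : Int),
      (∀ q ∈ st, pvValid grid q = true ∧ pvRt grid q = pvRt grid p0) →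
      V.Nodup → reg.Nodup →
      (∀ q ∈ reg, pvValid grid q = true ∧ pvRt grid q = pvRt grid p0) →
      (∀ q, pvValid grid q = true → pvRt grid q = pvRt grid p0 → (q ∈ V ↔ q ∈ reg)) →
      (∀ q ∈ reg, ∀ q', pvAdj grid q q' → q' ∈ reg ∨ q' ∈ st) →
      (p0 ∈ reg ∨ p0 ∈ st) →
      (π = (reg.map (pvBdryP grid)).sum) →
      (5 * ((pvPairs grid).filter (fun q => !(PySem.Set.contains V q))).length + st.length ≤ fuel) →
      ∃ Vout : PySem.Set (Int × Int),
        pvRegionLoop grid (pvN grid : Int) (pvM grid : Int) (pvCharA grid p0.1 p0.2)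
            fuel st V reg π = (pvTerm grid (pvRt grid p0), Vout) ∧
        Vout.Nodup ∧
        (∀ q, q ∈ Vout ↔ q ∈ V ∨ (pvValid grid q = true ∧ pvRt grid q = pvRt grid p0)) := by
  intro fuel
  induction fuel with
  | zero =>
    intro st V reg π hst hV hreg hregC hVC hclo hp0span hπ hfuel
    match st with
    | [] =>
      exact pvRegion_base grid hPre p0 hp0 0 V reg π hV hreg hregC hVC
        (fun q hq q' ha => hclo q hq q' ha)
        (hp0span.resolve_right List.not_mem_nil) hπ
    | cell :: rest =>
      exfalso
      simp only [List.length_cons] at hfuel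
      omega
  | succ f ih =>
    intro st V reg π hst hV hreg hregC hVC hclo hp0span hπ hfuel
    -- closure of reg implies the whole class is in reg once the stack is empty
    match st with
    | [] =>
      exact pvRegion_base grid hPre p0 hp0 (f + 1) V reg π hV hreg hregC hVC
        (fun q hq q' ha => hclo q hq q' ha)
        (hp0span.resolve_right List.not_mem_nil) hπ
    | cell :: rest =>
      have hCcell := hst cell List.mem_cons_self
      have hloop : pvRegionLoop grid (pvN grid : Int) (pvM grid : Int)
          (pvCharA grid p0.1 p0.2) (f + 1) (cell :: rest) V reg π =
          if PySem.Set.contains V cell then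
            pvRegionLoop grid (pvN grid : Int) (pvM grid : Int) (pvCharA grid p0.1 p0.2)
              f rest V reg π
          else
            pvRegionLoop grid (pvN grid : Int) (pvM grid : Int) (pvCharA grid p0.1 p0.2) f
              (pvDirs.foldl (pvStep grid (pvN grid : Int) (pvM grid : Int)
                (pvCharA grid p0.1 p0.2) cell) (rest, π)).1
              (PySem.Set.add V cell) (reg ++ [cell])
              (pvDirs.foldl (pvStep grid (pvN grid : Int) (pvM grid : Int)
                (pvCharA grid p0.1 p0.2) cell) (rest, π)).2 := rfl
      rw [hloop]
      by_cases hmem : PySem.Set.contains V cell = true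
      · rw [if_pos hmem]
        have hcellreg : cell ∈ reg :=
          (hVC cell hCcell.1 hCcell.2).mp ((PySem.Set.contains_iff V cell).mp hmem)
        refine ih rest V reg π (fun q hq => hst q (List.mem_cons_of_mem _ hq)) hV hreg hregC
          hVC ?_ ?_ hπ (by simp at hfuel ⊢; omega)
        · intro q hq q' hadj
          rcases hclo q hq q' hadj with h | h
          · exact Or.inl h
          · rcases List.mem_cons.mp h with rfl | h
            · exact Or.inl hcellreg
            · exact Or.inr h
        · rcases hp0span with h | h
          · exact Or.inl h
          · rcases List.mem_cons.mp h with rfl | h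
            · exact Or.inl hcellreg
            · exact Or.inr h
      · rw [if_neg hmem]
        rw [Bool.not_eq_true] at hmem
        have hcellV : cell ∉ V := fun hin => by
          rw [(PySem.Set.contains_iff V cell).mpr hin] at hmem
          cases hmem
        have hcellreg : cell ∉ reg := fun hin =>
          hcellV ((hVC cell hCcell.1 hCcell.2).mpr hin)
        have hχ : pvCharA grid cell.1 cell.2 = pvCharA grid p0.1 p0.2 :=
          pvRt_char grid hPre hp0 hCcell.1 hCcell.2.symm
        have hsp := pvStep_fold grid (pvCharA grid p0.1 p0.2) cell pvDirs (rest, π)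
        rw [hsp]
        -- the pushed neighbours
        have hpushed : ∀ q', q' ∈ (pvDirs.filter (pvGood grid (pvCharA grid p0.1 p0.2)
            cell)).reverse.map (fun d => (cell.1 + d.1, cell.2 + d.2)) ↔
            (∃ d ∈ pvDirs, q' = (cell.1 + d.1, cell.2 + d.2) ∧
              pvGood grid (pvCharA grid p0.1 p0.2) cell d = true) := by
          intro q'
          rw [List.mem_map]
          constructor
          · rintro ⟨d, hd, rfl⟩
            rw [List.mem_reverse, List.mem_filter] at hd
            exact ⟨d, hd.1, rfl, hd.2⟩
          · rintro ⟨d, hd, rfl, hgood⟩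
            exact ⟨d, by rw [List.mem_reverse, List.mem_filter]; exact ⟨hd, hgood⟩, rfl⟩
        have hgoodC : ∀ d ∈ pvDirs, pvGood grid (pvCharA grid p0.1 p0.2) cell d = true →
            pvValid grid (cell.1 + d.1, cell.2 + d.2) = true ∧
            pvRt grid (cell.1 + d.1, cell.2 + d.2) = pvRt grid p0 := by
          intro d hd hgood
          unfold pvGood at hgood
          rw [Bool.and_eq_true, decide_eq_true_eq, decide_eq_true_eq] at hgood
          have hv : pvValid grid (cell.1 + d.1, cell.2 + d.2) = true := by
            unfold pvValid; simp only [decide_eq_true_eq]; exact hgood.1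
          have hadj : pvAdj grid cell (cell.1 + d.1, cell.2 + d.2) :=
            ⟨hCcell.1, hv, ⟨d, hd, rfl⟩, by
              show pvCharA grid (cell.1 + d.1) (cell.2 + d.2) = _
              rw [hgood.2, hχ]⟩
          exact ⟨hv, (pvAdj_rt grid hPre hadj).symm.trans hCcell.2⟩
        -- one fewer unvisited cell
        have hcount : ((pvPairs grid).filter
              (fun q => !PySem.Set.contains V q)).length =
            ((pvPairs grid).filter
              (fun q => !PySem.Set.contains (PySem.Set.add V cell) q)).length + 1 := by
          rw [← List.countP_eq_length_filter, ← List.countP_eq_length_filter]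
          apply pvCountP_drop_one (pvPairs_nodup grid)
            ((pvPairs_mem grid cell).mpr hCcell.1)
          · rw [hmem]; rfl
          · have h1 : PySem.Set.contains (PySem.Set.add V cell) cell = true :=
              (PySem.Set.contains_iff _ _).mpr
                ((PySem.Set.mem_add V cell cell).mpr (Or.inr rfl))
            rw [h1]; rfl
          · intro y _ hy
            have h1 : PySem.Set.contains (PySem.Set.add V cell) y =
                PySem.Set.contains V y := by
              apply pvContains_congr
              rw [PySem.Set.mem_add]
              exact ⟨fun h => h.resolve_right hy, Or.inl⟩
            rw [h1]
        obtain ⟨Vout, hres, hVoutnd, hVoutmem⟩ := ih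
          ((pvDirs.filter (pvGood grid (pvCharA grid p0.1 p0.2) cell)).reverse.map
            (fun d => (cell.1 + d.1, cell.2 + d.2)) ++ rest)
          (PySem.Set.add V cell) (reg ++ [cell])
          (π + ((pvDirs.filter
            (fun d => !pvGood grid (pvCharA grid p0.1 p0.2) cell d)).length : Int))
          (by -- stack invariant
            intro q hq
            rcases List.mem_append.mp hq with hq | hq
            · obtain ⟨d, hd, rfl, hgood⟩ := (hpushed q).mp hq
              exact hgoodC d hd hgood
            · exact hst q (List.mem_cons_of_mem _ hq))
          (PySem.Set.nodup_add V cell hV)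
          (by -- region nodup
            rw [List.nodup_append]
            refine ⟨hreg, List.nodup_singleton cell, ?_⟩
            intro a ha b hb
            rw [List.mem_singleton] at hb
            exact fun habs => hcellreg ((habs.trans hb) ▸ ha))
          (by -- region in class
            intro q hq
            rcases List.mem_append.mp hq with hq | hq
            · exact hregC q hq
            · rw [List.mem_singleton] at hq
              exact hq ▸ hCcell)
          (by -- visited ↔ region on the class
            intro q hqv hqr
            rw [PySem.Set.mem_add, List.mem_append, List.mem_singleton]
            rw [hVC q hqv hqr])
          (by -- closure
            intro q hq q' hadj
            rcases List.mem_append.mp hq with hq | hq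
            · rcases hclo q hq q' hadj with h | h
              · exact Or.inl (List.mem_append.mpr (Or.inl h))
              · rcases List.mem_cons.mp h with rfl | h
                · exact Or.inl (List.mem_append.mpr (Or.inr (List.mem_singleton.mpr rfl)))
                · exact Or.inr (List.mem_append.mpr (Or.inr h))
            · rw [List.mem_singleton] at hq
              subst hq
              obtain ⟨_, hq'v, ⟨d, hd, rfl⟩, hcq⟩ := hadj
              have hgood : pvGood grid (pvCharA grid p0.1 p0.2) q d = true := by
                unfold pvGood
                rw [Bool.and_eq_true, decide_eq_true_eq, decide_eq_true_eq]
                have hq'v2 := hq'v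
                unfold pvValid at hq'v2
                simp only [decide_eq_true_eq] at hq'v2
                exact ⟨hq'v2, by rw [hcq, hχ]⟩
              exact Or.inr (List.mem_append.mpr (Or.inl
                ((hpushed _).mpr ⟨d, hd, rfl, hgood⟩))))
          (by -- start cell
            rcases hp0span with h | h
            · exact Or.inl (List.mem_append.mpr (Or.inl h))
            · rcases List.mem_cons.mp h with rfl | h
              · exact Or.inl (List.mem_append.mpr (Or.inr (List.mem_singleton.mpr rfl)))
              · exact Or.inr (List.mem_append.mpr (Or.inr h)))
          (by -- perimeter value
            rw [hπ, ← hχ, pvBdry_count grid hPre cell hCcell.1]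
            simp)
          (by -- fuel
            have hlen : ((pvDirs.filter (pvGood grid (pvCharA grid p0.1 p0.2)
                cell)).reverse.map (fun d => (cell.1 + d.1, cell.2 + d.2))).length ≤ 4 := by
              rw [List.length_map, List.length_reverse]
              exact le_trans (List.length_filter_le _ _) (by rfl)
            rw [hcount] at hfuel
            simp only [List.length_append, List.length_cons] at hfuel ⊢
            omega)
        refine ⟨Vout, hres, hVoutnd, fun q => ?_⟩
        rw [hVoutmem q, PySem.Set.mem_add]
        constructor
        · rintro ((h | h) | h)
          · exact Or.inl h
          · exact Or.inr (h ▸ hCcell)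
          · exact Or.inr h
        · rintro (h | h)
          · exact Or.inl (Or.inl h)
          · exact Or.inr h

-- ---------- A side: the outer loop ----------

def pvBody (grid : List String) (acc : PySem.Set (Int × Int) × Int) (p : Int × Int) :
    PySem.Set (Int × Int) × Int :=
  if PySem.Set.contains acc.1 p then acc
  else
    ((get_region_cost grid p (pvCharA grid p.1 p.2) acc.1).2,
     acc.2 + (get_region_cost grid p (pvCharA grid p.1 p.2) acc.1).1)

theorem pvTotal_eq_foldl (grid : List String) :
    get_total_cost grid = ((pvPairs grid).foldl (pvBody grid) ([], 0)).2 := by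
  unfold get_total_cost
  rw [show PySem.Str.len (grid.headD "") = ((pvM grid : Nat) : Int) from PySem.Str.len_eq _]
  rw [show ((grid.length : Int)) = ((pvN grid : Nat) : Int) from rfl]
  simp only [PySem.List.pyRange_zero_nat, List.foldl_map]
  conv_rhs => rw [pvPairs, List.foldl_map, pvCells, pvFoldl_flatMap]
  simp only [List.foldl_map]
  rfl

theorem pvPartial_snoc_mem (grid : List String) (ks : List Nat) (k : Nat) (h : k ∈ ks) :
    pvPartial grid (ks ++ [k]) = pvPartial grid ks := by
  unfold pvPartial
  rw [PySem.List.dedup_eq_ofList, PySem.List.dedup_eq_ofList,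
    PySem.Set.ofList_eq_foldl, PySem.Set.ofList_eq_foldl, List.foldl_append,
    List.foldl_cons, List.foldl_nil]
  have hadddef : ∀ (s : PySem.Set Nat) (x : Nat),
      PySem.Set.add s x = if s.contains x = true then s else s ++ [x] := fun _ _ => rfl
  rw [hadddef, if_pos (by
    rw [PySem.Set.contains_iff, ← PySem.Set.ofList_eq_foldl, PySem.Set.mem_ofList]
    exact h)]

theorem pvPartial_snoc_new (grid : List String) (ks : List Nat) (k : Nat) (h : ¬ k ∈ ks) :
    pvPartial grid (ks ++ [k]) = pvPartial grid ks + pvTerm grid k := by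
  unfold pvPartial
  rw [PySem.List.dedup_eq_ofList, PySem.List.dedup_eq_ofList,
    PySem.Set.ofList_eq_foldl, PySem.Set.ofList_eq_foldl, List.foldl_append,
    List.foldl_cons, List.foldl_nil]
  have hadddef : ∀ (s : PySem.Set Nat) (x : Nat),
      PySem.Set.add s x = if s.contains x = true then s else s ++ [x] := fun _ _ => rfl
  rw [hadddef, if_neg (by
    rw [PySem.Set.contains_iff, ← PySem.Set.ofList_eq_foldl, PySem.Set.mem_ofList]
    exact h)]
  rw [List.map_append, List.sum_append]
  simp

theorem pvOuter_spec (grid : List String) (hPre : Pre_get_total_cost grid) :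
    ∀ (S L : List (Int × Int)), pvPairs grid = L ++ S →
    ∀ (V : PySem.Set (Int × Int)) (t : Int),
      V.Nodup →
      (∀ q, q ∈ V ↔ (pvValid grid q = true ∧ ∃ p ∈ L, pvRt grid q = pvRt grid p)) →
      t = pvPartial grid (L.map (pvRt grid)) →
      (S.foldl (pvBody grid) (V, t)).2 = pvPartial grid ((L ++ S).map (pvRt grid)) := by
  intro S
  induction S with
  | nil =>
    intro L hsplit V t hV hVinv ht
    rw [List.foldl_nil, List.append_nil]
    exact ht
  | cons p S' ihS =>
    intro L hsplit V t hV hVinv ht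
    have hpmem : p ∈ pvPairs grid := by rw [hsplit]; simp
    have hpv : pvValid grid p = true := (pvPairs_mem grid p).mp hpmem
    have hsplit' : pvPairs grid = (L ++ [p]) ++ S' := by rw [hsplit]; simp
    rw [List.foldl_cons]
    rw [show (L ++ p :: S') = ((L ++ [p]) ++ S') by simp]
    by_cases hc : PySem.Set.contains V p = true
    · have hbody : pvBody grid (V, t) p = (V, t) := by
        unfold pvBody
        rw [if_pos hc]
      rw [hbody]
      apply ihS (L ++ [p]) hsplit' V t hV
      · intro q
        rw [hVinv q]
        constructor
        · rintro ⟨hqv, p', hp', hrt⟩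
          exact ⟨hqv, p', List.mem_append.mpr (Or.inl hp'), hrt⟩
        · rintro ⟨hqv, p', hp', hrt⟩
          rcases List.mem_append.mp hp' with hp' | hp'
          · exact ⟨hqv, p', hp', hrt⟩
          · rw [List.mem_singleton] at hp'
            obtain ⟨_, p'', hp'', hrt'⟩ := (hVinv p).mp ((PySem.Set.contains_iff V p).mp hc)
            exact ⟨hqv, p'', hp'', (hp' ▸ hrt : pvRt grid q = pvRt grid p).trans hrt'⟩
      · rw [List.map_append]
        rw [show List.map (pvRt grid) [p] = [pvRt grid p] from rfl]
        rw [pvPartial_snoc_mem grid _ _ ?_]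
        · exact ht
        · obtain ⟨_, p'', hp'', hrt'⟩ := (hVinv p).mp ((PySem.Set.contains_iff V p).mp hc)
          exact List.mem_map.mpr ⟨p'', hp'', hrt'.symm⟩
    · have hpnV : p ∉ V := fun hin => hc ((PySem.Set.contains_iff V p).mpr hin)
      have hfresh : ∀ q, pvValid grid q = true → pvRt grid q = pvRt grid p → q ∉ V := by
        intro q hqv hqr hin
        obtain ⟨_, p'', hp'', hrt'⟩ := (hVinv q).mp hin
        exact hpnV ((hVinv p).mpr ⟨hpv, p'', hp'', hqr ▸ hrt'⟩)
      have hrc : get_region_cost grid p (pvCharA grid p.1 p.2) V =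
          pvRegionLoop grid (pvN grid : Int) (pvM grid : Int) (pvCharA grid p.1 p.2)
            (5 * pvNM grid + 1) [p] V [] 0 := by
        unfold get_region_cost
        rw [show PySem.Str.len (grid.headD "") = ((pvM grid : Nat) : Int) from
          PySem.Str.len_eq _]
        rfl
      obtain ⟨Vout, heq, hVoutnd, hVoutmem⟩ :=
        pvRegion_spec grid hPre p hpv (5 * pvNM grid + 1) [p] V [] 0
          (by intro q hq; rw [List.mem_singleton] at hq; exact ⟨hq ▸ hpv, hq ▸ rfl⟩)
          hV List.nodup_nil (by intro q hq; cases hq)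
          (by intro q hqv hqr
              simp only [List.not_mem_nil, iff_false]
              exact hfresh q hqv hqr)
          (by intro q hq; cases hq)
          (Or.inr (List.mem_singleton.mpr rfl))
          rfl
          (by
            have hle : ((pvPairs grid).filter
                (fun q => !PySem.Set.contains V q)).length ≤ pvNM grid := by
              rw [← pvPairs_length grid]
              exact List.length_filter_le _ _
            simp only [List.length_cons, List.length_nil]
            omega)
      have hbody : pvBody grid (V, t) p = (Vout, t + pvTerm grid (pvRt grid p)) := by
        unfold pvBody
        rw [if_neg hc]
        show ((get_region_cost grid p (pvCharA grid p.1 p.2) V).2,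
          t + (get_region_cost grid p (pvCharA grid p.1 p.2) V).1) = _
        rw [hrc, heq]
      rw [hbody]
      apply ihS (L ++ [p]) hsplit' Vout _ hVoutnd
      · intro q
        rw [hVoutmem q, hVinv q]
        constructor
        · rintro (⟨hqv, p', hp', hrt⟩ | ⟨hqv, hrt⟩)
          · exact ⟨hqv, p', List.mem_append.mpr (Or.inl hp'), hrt⟩
          · exact ⟨hqv, p, List.mem_append.mpr (Or.inr (List.mem_singleton.mpr rfl)), hrt⟩
        · rintro ⟨hqv, p', hp', hrt⟩
          rcases List.mem_append.mp hp' with hp' | hp'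
          · exact Or.inl ⟨hqv, p', hp', hrt⟩
          · rw [List.mem_singleton] at hp'
            exact Or.inr ⟨hqv, hp' ▸ hrt⟩
      · rw [List.map_append]
        rw [show List.map (pvRt grid) [p] = [pvRt grid p] from rfl]
        rw [pvPartial_snoc_new grid _ _ ?_, ht]
        intro hin
        obtain ⟨p'', hp'', hrt'⟩ := List.mem_map.mp hin
        exact hpnV ((hVinv p).mpr ⟨hpv, p'', hp'', hrt'.symm⟩)

theorem pvA_total (grid : List String) (hPre : Pre_get_total_cost grid) :
    get_total_cost grid = pvGrand grid := by
  rw [pvTotal_eq_foldl]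
  have h := pvOuter_spec grid hPre (pvPairs grid) [] (by simp) [] 0 List.nodup_nil
    (by intro q
        simp only [List.not_mem_nil, false_iff, not_and]
        rintro hqv ⟨p', hp', _⟩
        cases hp')
    rfl
  rw [h]
  rfl

-- ---------- B side ----------

theorem pvDictFold_getD {β : Type} (f : β → Nat) (g : β → Int) :
    ∀ (xs : List β) (d : PySem.Dict Nat Int) (k : Nat),
      (xs.foldl (fun d x => d.insert (f x) (d.getD (f x) 0 + g x)) d).getD k 0 =
        d.getD k 0 + ((xs.filter (fun x => f x == k)).map g).sum := by
  intro xs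
  induction xs with
  | nil => intro d k; simp
  | cons x xs ih =>
    intro d k
    rw [List.foldl_cons, ih, PySem.Dict.getD_insert]
    by_cases hk : f x = k
    · rw [if_pos hk.symm, hk]
      have hf : (x :: xs).filter (fun y => f y == k) = x :: xs.filter (fun y => f y == k) := by
        rw [List.filter_cons, if_pos (by simp [hk])]
      rw [hf, List.map_cons, List.sum_cons]
      ring
    · rw [if_neg (fun hcontra => hk hcontra.symm)]
      have hf : (x :: xs).filter (fun y => f y == k) = xs.filter (fun y => f y == k) := by
        rw [List.filter_cons, if_neg (by simp [hk])]
      rw [hf]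

theorem pvDict_get?_of_mem (l : List (Nat × Int)) (hnd : (l.map Prod.fst).Nodup) :
    ∀ kv ∈ l, (PySem.Dict.mk l).get? kv.1 = some kv.2 := by
  induction l with
  | nil => intro kv h; cases h
  | cons hd rest ih =>
    intro kv hkv
    rcases List.mem_cons.mp hkv with rfl | hkv'
    · rw [PySem.Dict.get?_mk_cons, if_pos (by simp)]
    · rw [List.map_cons, List.nodup_cons] at hnd
      have hne : hd.1 ≠ kv.1 := by
        intro hcontra
        exact hnd.1 (hcontra ▸ List.mem_map.mpr ⟨kv, hkv', rfl⟩)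
      rw [PySem.Dict.get?_mk_cons, if_neg (by simpa using hne)]
      exact ih hnd.2 kv hkv'

theorem pvDict_items_eq (d : PySem.Dict Nat Int) (hnd : d.keys.Nodup) :
    d.items = d.keys.map (fun k => (k, d.getD k 0)) := by
  show d.items = (d.items.map Prod.fst).map (fun k => (k, d.getD k 0))
  rw [List.map_map]
  conv_lhs => rw [← List.map_id d.items]
  apply List.map_congr_left
  intro kv hkv
  have hget : d.get? kv.1 = some kv.2 := by
    obtain ⟨items⟩ := d
    exact pvDict_get?_of_mem items hnd kv hkv
  show kv = (kv.1, d.getD kv.1 0)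
  rw [show d.getD kv.1 0 = (d.get? kv.1).getD 0 from rfl, hget]
  rfl

theorem pvDictFold_keys {β : Type} (f : β → Nat) (g : β → Int) (xs : List β) :
    (xs.foldl (fun d x => d.insert (f x) (d.getD (f x) 0 + g x)) (PySem.Dict.empty)).keys =
      PySem.List.dedup (xs.map f) := by
  rw [PySem.Dict.keys_foldl_insert_key xs f (fun d x => d.getD (f x) 0 + g x) PySem.Dict.empty]
  rw [PySem.List.dedup_eq_ofList, PySem.Set.ofList_eq_foldl]
  rfl

theorem pvB_total (grid : List String) (hPre : Pre_get_total_cost grid) :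
    get_total_cost_alt grid = pvGrand grid := by
  clear hPre
  have hrt : ∀ rc : Nat × Nat, pvRt grid ((rc.1 : Int), (rc.2 : Int)) =
      pvRoot grid (rc.1 * pvM grid + rc.2) := by
    intro rc
    unfold pvRt pvIdx
    simp
  have hbd : ∀ rc : Nat × Nat, pvBdryP grid ((rc.1 : Int), (rc.2 : Int)) =
      pvBoundary grid (pvN grid) (pvM grid) rc.1 rc.2 := by
    intro rc
    unfold pvBdryP
    simp
  have hAgg : pvAgg grid (pvN grid) (pvM grid) (pvBuildParent grid (pvN grid) (pvM grid)) =
      ((pvCells grid).foldl (fun (d : PySem.Dict Nat Int) rc => d.insert (pvRoot grid (rc.1 * pvM grid + rc.2))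
          (d.getD (pvRoot grid (rc.1 * pvM grid + rc.2)) 0 + 1)) PySem.Dict.empty,
       (pvCells grid).foldl (fun d rc => d.insert (pvRoot grid (rc.1 * pvM grid + rc.2))
          (d.getD (pvRoot grid (rc.1 * pvM grid + rc.2)) 0 +
            pvBoundary grid (pvN grid) (pvM grid) rc.1 rc.2)) PySem.Dict.empty) := by
    have hpair : pvAgg grid (pvN grid) (pvM grid) (pvBuildParent grid (pvN grid) (pvM grid)) =
        (pvCells grid).foldl (fun acc rc =>
          (acc.1.insert (pvRoot grid (rc.1 * pvM grid + rc.2))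
            (acc.1.getD (pvRoot grid (rc.1 * pvM grid + rc.2)) 0 + 1),
           acc.2.insert (pvRoot grid (rc.1 * pvM grid + rc.2))
            (acc.2.getD (pvRoot grid (rc.1 * pvM grid + rc.2)) 0 +
              pvBoundary grid (pvN grid) (pvM grid) rc.1 rc.2)))
          (PySem.Dict.empty, PySem.Dict.empty) := by
      unfold pvAgg pvCells
      rw [pvFoldl_flatMap]
      simp only [List.foldl_map]
      rfl
    rw [hpair]
    exact PySem.List.foldl_prod_mk
      (fun (d : PySem.Dict Nat Int) (rc : Nat × Nat) => d.insert (pvRoot grid (rc.1 * pvM grid + rc.2))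
        (d.getD (pvRoot grid (rc.1 * pvM grid + rc.2)) 0 + 1))
      (fun (d : PySem.Dict Nat Int) (rc : Nat × Nat) => d.insert (pvRoot grid (rc.1 * pvM grid + rc.2))
        (d.getD (pvRoot grid (rc.1 * pvM grid + rc.2)) 0 +
          pvBoundary grid (pvN grid) (pvM grid) rc.1 rc.2))
      (pvCells grid) PySem.Dict.empty PySem.Dict.empty
  have hgoal : get_total_cost_alt grid =
      ((pvAgg grid (pvN grid) (pvM grid)
        (pvBuildParent grid (pvN grid) (pvM grid))).1.items.foldl
        (fun s kv => s + kv.2 * (pvAgg grid (pvN grid) (pvM grid)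
          (pvBuildParent grid (pvN grid) (pvM grid))).2.getD kv.1 0) 0) := rfl
  rw [hgoal, hAgg]
  dsimp only
  have hkeys := pvDictFold_keys (fun rc : Nat × Nat => pvRoot grid (rc.1 * pvM grid + rc.2))
    (fun _ => (1 : Int)) (pvCells grid)
  have hknd : ((pvCells grid).foldl (fun (d : PySem.Dict Nat Int) rc =>
      d.insert (pvRoot grid (rc.1 * pvM grid + rc.2))
        (d.getD (pvRoot grid (rc.1 * pvM grid + rc.2)) 0 + 1))
      PySem.Dict.empty).keys.Nodup := by
    simp only [hkeys, PySem.List.dedup_eq_ofList]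
    exact PySem.Set.nodup_ofList _
  rw [pvDict_items_eq _ hknd]
  rw [PySem.List.foldl_add]
  rw [List.map_map]
  simp only [hkeys]
  have hgetA := pvDictFold_getD (fun rc : Nat × Nat => pvRoot grid (rc.1 * pvM grid + rc.2))
    (fun _ => (1 : Int)) (pvCells grid) PySem.Dict.empty
  have hgetB := pvDictFold_getD (fun rc : Nat × Nat => pvRoot grid (rc.1 * pvM grid + rc.2))
    (fun rc => pvBoundary grid (pvN grid) (pvM grid) rc.1 rc.2) (pvCells grid) PySem.Dict.empty
  -- right-hand side
  unfold pvGrand pvPartial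
  have hmapeq : (pvPairs grid).map (pvRt grid) =
      (pvCells grid).map (fun rc => pvRoot grid (rc.1 * pvM grid + rc.2)) := by
    unfold pvPairs
    rw [List.map_map]
    apply List.map_congr_left
    intro rc _
    exact hrt rc
  rw [hmapeq]
  rw [Int.zero_add]
  apply congrArg List.sum
  apply List.map_congr_left
  intro k hk
  show ((pvCells grid).foldl (fun (d : PySem.Dict Nat Int) rc =>
      d.insert (pvRoot grid (rc.1 * pvM grid + rc.2))
        (d.getD (pvRoot grid (rc.1 * pvM grid + rc.2)) 0 + 1))
      PySem.Dict.empty).getD k 0 *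
    ((pvCells grid).foldl (fun (d : PySem.Dict Nat Int) rc =>
      d.insert (pvRoot grid (rc.1 * pvM grid + rc.2))
        (d.getD (pvRoot grid (rc.1 * pvM grid + rc.2)) 0 +
          pvBoundary grid (pvN grid) (pvM grid) rc.1 rc.2))
      PySem.Dict.empty).getD k 0 = pvTerm grid k
  simp only [hgetA, hgetB]
  have hcls : pvCls grid k = ((pvCells grid).filter
      (fun rc => pvRoot grid (rc.1 * pvM grid + rc.2) == k)).map
      (fun rc => ((rc.1 : Int), (rc.2 : Int))) := by
    unfold pvCls pvPairs
    rw [List.filter_map]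
    congr 1
  unfold pvTerm
  rw [hcls, List.length_map, List.map_map]
  rw [show (pvBdryP grid ∘ fun rc : Nat × Nat => ((rc.1 : Int), (rc.2 : Int))) =
      (fun rc : Nat × Nat => pvBoundary grid (pvN grid) (pvM grid) rc.1 rc.2) from
    funext (fun rc => hbd rc)]
  rw [pvSum_one_eq_length]
  simp

-- ===== VERDICT (by name: the statement is the Claim_ definition above) =====
theorem get_total_cost_spec : Claim_equal_get_total_cost := by
  intro grid hDom hPre
  unfold Spec_get_total_cost
  rw [pvA_total grid hPre, pvB_total grid hPre]
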